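-- pv_equiv track=rewrite | github.com/iGEM-Uprize-I/Biosafety-Alternative-Recommendation-Tool-BART | Step3.py | build_pos_maps
-- ===== SOURCE A (Python) =====
-- from typing import Dict, List, Tuple, Optional
--
-- def build_pos_maps(aln_seq: str) -> Tuple[Dict[int,int], Dict[int,int]]:
--     """Build mapping between ungapped sequence positions (1-based) and alignment indices (0-based)."""
--     map_seq2aln: Dict[int,int] = {}
--     map_aln2seq: Dict[int,int] = {}
--     seq_pos = 0
--     for aln_i, ch in enumerate(aln_seq):
--         if ch != "-":
--             seq_pos += 1
--             map_seq2aln[seq_pos] = aln_i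
--             map_aln2seq[aln_i] = seq_pos
--         else:
--             map_aln2seq[aln_i] = 0
--     return map_seq2aln, map_aln2seq
-- ===== SOURCE B (Python) =====
-- def build_pos_maps(aln_seq):
--     """Build mapping between ungapped sequence positions (1-based) and alignment indices (0-based)."""
--     map_seq2aln = {}
--     map_aln2seq = {}
--     o = 0  # alignment index where the current gap-free segment starts
--     s = 0  # ungapped sequence positions consumed so far
--     for k, seg in enumerate(aln_seq.split('-')):
--         if k > 0:
--             map_aln2seq[o] = 0  # the '-' separating this segment from the previous one
--             o += 1
--         for j in range(len(seg)):
--             map_seq2aln[s + 1 + j] = o + j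
--             map_aln2seq[o + j] = s + 1 + j
--         s += len(seg)
--         o += len(seg)
--     return map_seq2aln, map_aln2seq
-- ===== Notes on version B (the rewrite author's own statement) =====
-- stated objective: alternative
-- what changed: Instead of A's fused per-character scan with a running counter and an if/else, B splits the string at the gap character into maximal gap-free segments and processes runs: for each segment it fills both maps over a range of offsets at once, emitting the single separating gap entry between consecutive segments.
import Mathlib
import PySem

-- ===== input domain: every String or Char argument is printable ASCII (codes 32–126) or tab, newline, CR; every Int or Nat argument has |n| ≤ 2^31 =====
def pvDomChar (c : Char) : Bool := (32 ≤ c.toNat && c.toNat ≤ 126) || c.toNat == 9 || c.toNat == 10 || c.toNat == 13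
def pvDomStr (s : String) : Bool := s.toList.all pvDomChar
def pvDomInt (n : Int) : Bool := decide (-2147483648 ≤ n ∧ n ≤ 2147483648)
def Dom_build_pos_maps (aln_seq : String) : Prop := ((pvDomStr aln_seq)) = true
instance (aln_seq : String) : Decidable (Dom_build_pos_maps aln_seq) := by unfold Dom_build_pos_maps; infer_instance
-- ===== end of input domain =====

-- B replaces A's fused per-character scan by a run-based algorithm: split on '-' into
-- gap-free segments and fill both maps segment by segment (objective: alternative);
-- the return value is proved equal on all of Dom.

-- ===== PORT A =====
-- loop body of A's single for-loop over enumerate(aln_seq)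
def stepA (st : PySem.Dict Int Int × PySem.Dict Int Int × Int) (p : Int × Char) :
    PySem.Dict Int Int × PySem.Dict Int Int × Int :=
  if p.2 != '-' then
    (st.1.insert (st.2.2 + 1) p.1, st.2.1.insert p.1 (st.2.2 + 1), st.2.2 + 1)
  else
    (st.1, st.2.1.insert p.1 0, st.2.2)

def build_pos_maps (aln_seq : String) : (List (Int × Int)) × (List (Int × Int)) :=
  let st := (PySem.List.enumerate aln_seq.toList).foldl stepA
    (PySem.Dict.empty, PySem.Dict.empty, 0)
  (st.1.items, st.2.1.items)

-- ===== PORT B =====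
-- body of B's outer loop over enumerate(aln_seq.split('-')); state = (map_seq2aln, map_aln2seq, o, s)
def stepSeg (st : PySem.Dict Int Int × PySem.Dict Int Int × Int × Int) (p : Int × List Char) :
    PySem.Dict Int Int × PySem.Dict Int Int × Int × Int :=
  let d2o : PySem.Dict Int Int × Int :=
    if p.1 > 0 then (st.2.1.insert st.2.2.1 0, st.2.2.1 + 1) else (st.2.1, st.2.2.1)
  let s := st.2.2.2
  let inner := (PySem.List.pyRange 0 (p.2.length : Int)).foldl
      (fun q j => (q.1.insert (s + 1 + j) (d2o.2 + j), q.2.insert (d2o.2 + j) (s + 1 + j)))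
      (st.1, d2o.1)
  (inner.1, inner.2, d2o.2 + (p.2.length : Int), s + (p.2.length : Int))

def build_pos_maps_alt (aln_seq : String) : (List (Int × Int)) × (List (Int × Int)) :=
  let st := (PySem.List.enumerate (PySem.Chars.splitOn aln_seq.toList ['-'])).foldl stepSeg
    (PySem.Dict.empty, PySem.Dict.empty, 0, 0)
  (st.1.items, st.2.1.items)

-- ===== PRECONDITION & SPEC =====
def Spec_build_pos_maps (aln_seq : String) (out : (List (Int × Int)) × (List (Int × Int))) : Prop := out = build_pos_maps_alt aln_seq
instance (aln_seq : String) (out : (List (Int × Int)) × (List (Int × Int))) : Decidable (Spec_build_pos_maps aln_seq out) := by unfold Spec_build_pos_maps; infer_instance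

-- ===== CLAIM (what is proved, stated in full; the proofs are below) =====
def Claim_equal_build_pos_maps : Prop := ∀ (aln_seq : String), Dom_build_pos_maps aln_seq → Spec_build_pos_maps aln_seq (build_pos_maps aln_seq)

-- ===== LEMMAS AND PROOFS =====

-- the common shape of both results, as one structural recursion over the characters
def specPairs : List Char → Int → Int → (List (Int × Int)) × (List (Int × Int))
  | [], _, _ => ([], [])
  | c :: cs, i, pos =>
    if c != '-' then
      ((pos + 1, i) :: (specPairs cs (i + 1) (pos + 1)).1, (i, pos + 1) :: (specPairs cs (i + 1) (pos + 1)).2)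
    else
      ((specPairs cs (i + 1) pos).1, (i, 0) :: (specPairs cs (i + 1) pos).2)

lemma contains_false_of_keys_lt {d : PySem.Dict Int Int} {k : Int}
    (h : ∀ x ∈ d.keys, x < k) : d.contains k = false := by
  rw [← Bool.not_eq_true, PySem.Dict.contains_iff_mem_keys]
  intro hmem
  exact absurd (h _ hmem) (by omega)

-- A's fold appends fresh pairs; items grow by exactly specPairs
lemma foldA (cs : List Char) : ∀ (i pos : Int) (m1 m2 : PySem.Dict Int Int),
    (∀ k ∈ m1.keys, k ≤ pos) → (∀ k ∈ m2.keys, k < i) →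
    ((PySem.List.enumerate cs i).foldl stepA (m1, m2, pos)).1.items = m1.items ++ (specPairs cs i pos).1
    ∧ ((PySem.List.enumerate cs i).foldl stepA (m1, m2, pos)).2.1.items = m2.items ++ (specPairs cs i pos).2 := by
  induction cs with
  | nil => intro i pos m1 m2 _ _; simp [PySem.List.enumerate_nil, specPairs]
  | cons c cs ih =>
    intro i pos m1 m2 h1 h2
    rw [PySem.List.enumerate_cons, List.foldl_cons]
    have hc1 : m1.contains (pos + 1) = false :=
      contains_false_of_keys_lt (fun x hx => by have := h1 x hx; omega)
    have hc2 : m2.contains i = false :=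
      contains_false_of_keys_lt (fun x hx => h2 x hx)
    by_cases hc : c = '-'
    · have hstep : stepA (m1, m2, pos) (i, c) = (m1, m2.insert i 0, pos) := by
        simp [stepA, hc]
      rw [hstep]
      have h2' : ∀ k ∈ (m2.insert i 0).keys, k < i + 1 := by
        intro k hk
        rw [PySem.Dict.keys_insert_of_not_contains _ _ hc2, List.mem_append] at hk
        rcases hk with hk | hk
        · have := h2 k hk; omega
        · simp at hk; omega
      obtain ⟨e1, e2⟩ := ih (i + 1) pos m1 (m2.insert i 0) h1 h2'
      refine ⟨by rw [e1]; simp [specPairs, hc], ?_⟩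
      rw [e2, PySem.Dict.items_insert_of_not_contains _ _ hc2]
      simp [specPairs, hc]
    · have hstep : stepA (m1, m2, pos) (i, c) = (m1.insert (pos + 1) i, m2.insert i (pos + 1), pos + 1) := by
        simp [stepA, hc]
      rw [hstep]
      have h1' : ∀ k ∈ (m1.insert (pos + 1) i).keys, k ≤ pos + 1 := by
        intro k hk
        rw [PySem.Dict.keys_insert_of_not_contains _ _ hc1, List.mem_append] at hk
        rcases hk with hk | hk
        · have := h1 k hk; omega
        · simp at hk; omega
      have h2' : ∀ k ∈ (m2.insert i (pos + 1)).keys, k < i + 1 := by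
        intro k hk
        rw [PySem.Dict.keys_insert_of_not_contains _ _ hc2, List.mem_append] at hk
        rcases hk with hk | hk
        · have := h2 k hk; omega
        · simp at hk; omega
      obtain ⟨e1, e2⟩ := ih (i + 1) (pos + 1) (m1.insert (pos + 1) i) (m2.insert i (pos + 1)) h1' h2'
      constructor
      · rw [e1, PySem.Dict.items_insert_of_not_contains _ _ hc1]
        simp [specPairs, hc]
      · rw [e2, PySem.Dict.items_insert_of_not_contains _ _ hc2]
        simp [specPairs, hc]

-- a functional model of aln_seq.split('-')
def split1 : List Char → List (List Char)
  | [] => [[]]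
  | c :: rest =>
    if c = '-' then [] :: split1 rest
    else List.modifyHead (fun p => c :: p) (split1 rest)

lemma split1_ne_nil (cs : List Char) : split1 cs ≠ [] := by
  induction cs with
  | nil => simp [split1]
  | cons c rest ih =>
    by_cases hc : c = '-'
    · simp [split1, hc]
    · simp only [split1, if_neg hc]
      cases h : split1 rest with
      | nil => exact absurd h ih
      | cons p ps => simp

lemma split1_cons (cs : List Char) : ∃ p ps, split1 cs = p :: ps := by
  cases h : split1 cs with
  | nil => exact absurd h (split1_ne_nil cs)
  | cons p ps => exact ⟨p, ps, rfl⟩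

lemma go_eq (l : List Char) : ∀ (fuel : Nat) (cur : List Char) (acc : List (List Char)),
    l.length < fuel →
    PySem.Chars.splitOn.go ['-'] fuel l cur acc
      = acc.reverse ++ List.modifyHead (fun p => cur.reverse ++ p) (split1 l) := by
  induction l with
  | nil =>
    intro fuel cur acc hf
    obtain ⟨f, rfl⟩ : ∃ f, fuel = f + 1 := ⟨fuel - 1, by omega⟩
    simp [PySem.Chars.splitOn.go, split1]
  | cons c rest ih =>
    intro fuel cur acc hf
    obtain ⟨f, rfl⟩ : ∃ f, fuel = f + 1 := ⟨fuel - 1, by omega⟩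
    rw [PySem.Chars.splitOn.go]
    by_cases hc : c = '-'
    · have hpre : List.isPrefixOf ['-'] (c :: rest) = true := by
        simp [List.isPrefixOf, hc]
      rw [if_pos hpre]
      have hdrop : List.drop (List.length ['-']) (c :: rest) = rest := by simp
      rw [hdrop, ih f [] (cur.reverse :: acc) (by simp at hf ⊢; omega)]
      obtain ⟨p, ps, hps⟩ := split1_cons rest
      simp [split1, hc, hps]
    · have hpre : List.isPrefixOf ['-'] (c :: rest) = false := by
        simp [List.isPrefixOf]
        exact fun h => absurd h.symm hc
      rw [if_neg (by simp [hpre])]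
      rw [ih f (c :: cur) acc (by simp at hf ⊢; omega)]
      obtain ⟨p, ps, hps⟩ := split1_cons rest
      simp [split1, hc, hps]

lemma splitOn_eq_split1 (cs : List Char) : PySem.Chars.splitOn cs ['-'] = split1 cs := by
  rw [PySem.Chars.splitOn, go_eq cs (cs.length + 1) [] [] (by omega)]
  obtain ⟨p, ps, hps⟩ := split1_cons cs
  simp [hps]

lemma split1_gap_free (cs : List Char) : ∀ seg ∈ split1 cs, ∀ c ∈ seg, c ≠ '-' := by
  induction cs with
  | nil => intro seg hseg; simp [split1] at hseg; simp [hseg]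
  | cons c rest ih =>
    intro seg hseg
    by_cases hc : c = '-'
    · simp only [split1, if_pos hc, List.mem_cons] at hseg
      rcases hseg with rfl | hseg
      · simp
      · exact ih seg hseg
    · simp only [split1, if_neg hc] at hseg
      obtain ⟨p, ps, hps⟩ := split1_cons rest
      rw [hps, List.modifyHead_cons, List.mem_cons] at hseg
      rcases hseg with rfl | hseg
      · intro x hx
        rcases List.mem_cons.mp hx with rfl | hx
        · exact hc
        · exact ih p (hps ▸ List.mem_cons_self) x hx
      · exact ih seg (hps ▸ List.mem_cons_of_mem p hseg)

-- the '-'-prefixed concatenation of the trailing segments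
def tailJoin (segs : List (List Char)) : List Char := segs.flatMap (fun seg => '-' :: seg)

lemma split1_join (cs : List Char) : ∀ seg0 rest, split1 cs = seg0 :: rest →
    seg0 ++ tailJoin rest = cs := by
  induction cs with
  | nil =>
    intro seg0 rest h
    simp only [split1] at h
    injection h with h1 h2
    subst h1; subst h2
    simp [tailJoin]
  | cons c cs' ih =>
    intro seg0 rest h
    obtain ⟨p, ps, hps⟩ := split1_cons cs'
    by_cases hc : c = '-'
    · rw [split1, if_pos hc] at h
      injection h with h1 h2
      subst h1; subst h2
      rw [hps, hc]
      have hih := ih p ps hps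
      simp only [tailJoin, List.flatMap_cons, List.nil_append, List.cons_append]
      simp only [tailJoin] at hih
      rw [hih]
    · rw [split1, if_neg hc, hps, List.modifyHead_cons] at h
      injection h with h1 h2
      subst h1; subst h2
      have hih := ih p ps hps
      rw [List.cons_append, hih]

-- specPairs across one gap-free segment is a pair of range tables
lemma spec_seg (seg : List Char) : ∀ (rest : List Char) (o s : Int), (∀ c ∈ seg, c ≠ '-') →
    specPairs (seg ++ rest) o s =
      ((List.range seg.length).map (fun j : Nat => (s + 1 + (j : Int), o + (j : Int)))
         ++ (specPairs rest (o + seg.length) (s + seg.length)).1,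
       (List.range seg.length).map (fun j : Nat => (o + (j : Int), s + 1 + (j : Int)))
         ++ (specPairs rest (o + seg.length) (s + seg.length)).2) := by
  induction seg with
  | nil => intro rest o s _; simp [specPairs]
  | cons c seg ih =>
    intro rest o s hgf
    have hc : c ≠ '-' := hgf c List.mem_cons_self
    have ih' := ih rest (o + 1) (s + 1) (fun x hx => hgf x (List.mem_cons_of_mem c hx))
    have ho : o + ((c :: seg).length : Int) = o + 1 + (seg.length : Int) := by
      simp; ring
    have hs : s + ((c :: seg).length : Int) = s + 1 + (seg.length : Int) := by
      simp; ring
    have hmap1 : (List.range (c :: seg).length).map (fun j : Nat => (s + 1 + (j : Int), o + (j : Int)))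
        = (s + 1, o) :: (List.range seg.length).map (fun j : Nat => (s + 1 + 1 + (j : Int), o + 1 + (j : Int))) := by
      rw [List.length_cons, List.range_succ_eq_map, List.map_cons, List.map_map]
      congr 1
      · norm_num
      · apply List.map_congr_left
        intro j _
        simp only [Function.comp, Nat.succ_eq_add_one, Prod.mk.injEq]
        constructor <;> (push_cast; ring)
    have hmap2 : (List.range (c :: seg).length).map (fun j : Nat => (o + (j : Int), s + 1 + (j : Int)))
        = (o, s + 1) :: (List.range seg.length).map (fun j : Nat => (o + 1 + (j : Int), s + 1 + 1 + (j : Int))) := by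
      rw [List.length_cons, List.range_succ_eq_map, List.map_cons, List.map_map]
      congr 1
      · norm_num
      · apply List.map_congr_left
        intro j _
        simp only [Function.comp, Nat.succ_eq_add_one, Prod.mk.injEq]
        constructor <;> (push_cast; ring)
    rw [List.cons_append]
    rw [show specPairs (c :: (seg ++ rest)) o s
        = ((s + 1, o) :: (specPairs (seg ++ rest) (o + 1) (s + 1)).1,
           (o, s + 1) :: (specPairs (seg ++ rest) (o + 1) (s + 1)).2) from by
      simp [specPairs, hc]]
    rw [ih', hmap1, hmap2, ho, hs]
    simp

-- the inner 'for j in range(len(seg))' loop: both dicts grow by a fresh range table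
lemma innerFold (L : Nat) (o s : Int) (d1 d2 : PySem.Dict Int Int)
    (h1 : ∀ x ∈ d1.keys, x ≤ s) (h2 : ∀ x ∈ d2.keys, x < o) :
    ((PySem.List.pyRange 0 (L : Int)).foldl
        (fun q j => (q.1.insert (s + 1 + j) (o + j), q.2.insert (o + j) (s + 1 + j))) (d1, d2)).1.items
      = d1.items ++ (List.range L).map (fun j : Nat => (s + 1 + (j : Int), o + (j : Int)))
    ∧ ((PySem.List.pyRange 0 (L : Int)).foldl
        (fun q j => (q.1.insert (s + 1 + j) (o + j), q.2.insert (o + j) (s + 1 + j))) (d1, d2)).2.items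
      = d2.items ++ (List.range L).map (fun j : Nat => (o + (j : Int), s + 1 + (j : Int))) := by
  have hsplit := PySem.List.foldl_prod_mk
    (f := fun (d : PySem.Dict Int Int) (j : Int) => d.insert (s + 1 + j) (o + j))
    (g := fun (d : PySem.Dict Int Int) (j : Int) => d.insert (o + j) (s + 1 + j))
    (PySem.List.pyRange 0 (L : Int)) d1 d2
  simp only at hsplit
  rw [hsplit, PySem.List.pyRange_zero_natCast, List.foldl_map, List.foldl_map]
  constructor
  · exact PySem.Dict.items_foldl_insert_fresh (List.range L)
      (fun j : Nat => s + 1 + (j : Int)) (fun j : Nat => o + (j : Int)) d1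
      (fun a _ => contains_false_of_keys_lt (k := s + 1 + (a : Int)) (fun x hx => by have := h1 x hx; omega))
      (List.Nodup.map (fun a b h => by omega) List.nodup_range)
  · exact PySem.Dict.items_foldl_insert_fresh (List.range L)
      (fun j : Nat => o + (j : Int)) (fun j : Nat => s + 1 + (j : Int)) d2
      (fun a _ => contains_false_of_keys_lt (k := o + (a : Int)) (fun x hx => by have := h2 x hx; omega))
      (List.Nodup.map (fun a b h => by omega) List.nodup_range)

lemma keys_after_inner (d : PySem.Dict Int Int) (t : List (Int × Int))
    (h : d.items = t) : d.keys = t.map (·.1) := by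
  rw [PySem.Dict.keys, h]

-- B's outer fold over the trailing ('-'-preceded) segments
lemma foldSegsTail (segs : List (List Char)) : ∀ (k o s : Int) (d1 d2 : PySem.Dict Int Int),
    1 ≤ k → (∀ seg ∈ segs, ∀ c ∈ seg, c ≠ '-') →
    (∀ x ∈ d1.keys, x ≤ s) → (∀ x ∈ d2.keys, x < o) →
    ((PySem.List.enumerate segs k).foldl stepSeg (d1, d2, o, s)).1.items
      = d1.items ++ (specPairs (tailJoin segs) o s).1
    ∧ ((PySem.List.enumerate segs k).foldl stepSeg (d1, d2, o, s)).2.1.items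
      = d2.items ++ (specPairs (tailJoin segs) o s).2 := by
  induction segs with
  | nil => intro k o s d1 d2 _ _ _ _; simp [PySem.List.enumerate_nil, tailJoin, specPairs]
  | cons seg segs ih =>
    intro k o s d1 d2 hk hgf h1 h2
    rw [PySem.List.enumerate_cons, List.foldl_cons]
    have hc2 : d2.contains o = false := contains_false_of_keys_lt h2
    have hstep : stepSeg (d1, d2, o, s) (k, seg) =
        (((PySem.List.pyRange 0 (seg.length : Int)).foldl
            (fun q j => (q.1.insert (s + 1 + j) (o + 1 + j), q.2.insert (o + 1 + j) (s + 1 + j)))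
            (d1, d2.insert o 0)).1,
         ((PySem.List.pyRange 0 (seg.length : Int)).foldl
            (fun q j => (q.1.insert (s + 1 + j) (o + 1 + j), q.2.insert (o + 1 + j) (s + 1 + j)))
            (d1, d2.insert o 0)).2,
         o + 1 + (seg.length : Int), s + (seg.length : Int)) := by
      simp only [stepSeg, gt_iff_lt, if_pos (show (0 : Int) < k by omega)]
    rw [hstep]
    have h2' : ∀ x ∈ (d2.insert o 0).keys, x < o + 1 := by
      intro x hx
      rw [PySem.Dict.keys_insert_of_not_contains _ _ hc2, List.mem_append] at hx
      rcases hx with hx | hx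
      · have := h2 x hx; omega
      · simp at hx; omega
    obtain ⟨e1, e2⟩ := innerFold seg.length (o + 1) s d1 (d2.insert o 0) h1 h2'
    have h1'' : ∀ x ∈ (((PySem.List.pyRange 0 (seg.length : Int)).foldl
        (fun q j => (q.1.insert (s + 1 + j) (o + 1 + j), q.2.insert (o + 1 + j) (s + 1 + j)))
        (d1, d2.insert o 0)).1).keys, x ≤ s + (seg.length : Int) := by
      rw [keys_after_inner _ _ e1]
      intro x hx
      simp only [List.map_append, List.mem_append, List.map_map] at hx
      rcases hx with hx | hx
      · have := h1 x (by rw [PySem.Dict.keys]; exact hx); omega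
      · simp only [List.mem_map, List.mem_range, Function.comp] at hx
        obtain ⟨j, hj, rfl⟩ := hx
        omega
    have h2'' : ∀ x ∈ (((PySem.List.pyRange 0 (seg.length : Int)).foldl
        (fun q j => (q.1.insert (s + 1 + j) (o + 1 + j), q.2.insert (o + 1 + j) (s + 1 + j)))
        (d1, d2.insert o 0)).2).keys, x < o + 1 + (seg.length : Int) := by
      rw [keys_after_inner _ _ e2]
      intro x hx
      simp only [List.map_append, List.mem_append, List.map_map] at hx
      rcases hx with hx | hx
      · have := h2' x (by rw [PySem.Dict.keys]; exact hx); omega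
      · simp only [List.mem_map, List.mem_range, Function.comp] at hx
        obtain ⟨j, hj, rfl⟩ := hx
        omega
    obtain ⟨f1, f2⟩ := ih (k + 1) (o + 1 + (seg.length : Int)) (s + (seg.length : Int)) _ _
      (by omega) (fun sg hsg => hgf sg (List.mem_cons_of_mem seg hsg)) h1'' h2''
    have htj : tailJoin (seg :: segs) = '-' :: (seg ++ tailJoin segs) := by
      simp [tailJoin]
    have hspec : specPairs (tailJoin (seg :: segs)) o s =
        ((specPairs (seg ++ tailJoin segs) (o + 1) s).1,
         (o, 0) :: (specPairs (seg ++ tailJoin segs) (o + 1) s).2) := by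
      rw [htj]
      simp [specPairs]
    have hsegspec := spec_seg seg (tailJoin segs) (o + 1) s (hgf seg List.mem_cons_self)
    have ho : o + 1 + (seg.length : Int) = o + 1 + (seg.length : Int) := rfl
    constructor
    · rw [f1, e1, hspec]
      simp only
      rw [hsegspec]
      simp only
      rw [List.append_assoc]
    · rw [f2, e2, PySem.Dict.items_insert_of_not_contains _ _ hc2, hspec]
      simp only
      rw [hsegspec]
      simp only
      simp [List.append_assoc]

-- ===== VERDICT (by name: the statement is the Claim_ definition above) =====
theorem build_pos_maps_spec : Claim_equal_build_pos_maps := by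
  intro aln_seq _
  unfold Spec_build_pos_maps build_pos_maps build_pos_maps_alt
  set cs := aln_seq.toList with hcs
  obtain ⟨a1, a2⟩ := foldA cs 0 0 PySem.Dict.empty PySem.Dict.empty
    (by intro k hk; simp [PySem.Dict.keys, PySem.Dict.empty] at hk)
    (by intro k hk; simp [PySem.Dict.keys, PySem.Dict.empty] at hk)
  rw [splitOn_eq_split1]
  obtain ⟨seg0, rest, hsplit⟩ := split1_cons cs
  have hjoin : seg0 ++ tailJoin rest = cs := split1_join cs seg0 rest hsplit
  have hgf := split1_gap_free cs
  rw [hsplit, PySem.List.enumerate_cons, List.foldl_cons]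
  have hstep0 : stepSeg (PySem.Dict.empty, PySem.Dict.empty, 0, 0) (0, seg0) =
      (((PySem.List.pyRange 0 (seg0.length : Int)).foldl
          (fun q j => (q.1.insert (0 + 1 + j) (0 + j), q.2.insert (0 + j) (0 + 1 + j)))
          (PySem.Dict.empty, PySem.Dict.empty)).1,
       ((PySem.List.pyRange 0 (seg0.length : Int)).foldl
          (fun q j => (q.1.insert (0 + 1 + j) (0 + j), q.2.insert (0 + j) (0 + 1 + j)))
          (PySem.Dict.empty, PySem.Dict.empty)).2,
       0 + (seg0.length : Int), 0 + (seg0.length : Int)) := by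
    simp only [stepSeg, gt_iff_lt, if_neg (show ¬ ((0 : Int) < 0) by omega)]
  rw [hstep0]
  obtain ⟨e1, e2⟩ := innerFold seg0.length 0 0 PySem.Dict.empty PySem.Dict.empty
    (by intro x hx; simp [PySem.Dict.keys, PySem.Dict.empty] at hx)
    (by intro x hx; simp [PySem.Dict.keys, PySem.Dict.empty] at hx)
  have h1'' : ∀ x ∈ (((PySem.List.pyRange 0 (seg0.length : Int)).foldl
      (fun q j => (q.1.insert (0 + 1 + j) (0 + j), q.2.insert (0 + j) (0 + 1 + j)))
      (PySem.Dict.empty, PySem.Dict.empty)).1).keys, x ≤ 0 + (seg0.length : Int) := by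
    rw [keys_after_inner _ _ e1]
    intro x hx
    simp only [List.map_append, List.mem_append, List.map_map] at hx
    rcases hx with hx | hx
    · simp [PySem.Dict.empty] at hx
    · simp only [List.mem_map, List.mem_range, Function.comp] at hx
      obtain ⟨j, hj, rfl⟩ := hx
      omega
  have h2'' : ∀ x ∈ (((PySem.List.pyRange 0 (seg0.length : Int)).foldl
      (fun q j => (q.1.insert (0 + 1 + j) (0 + j), q.2.insert (0 + j) (0 + 1 + j)))
      (PySem.Dict.empty, PySem.Dict.empty)).2).keys, x < 0 + (seg0.length : Int) := by
    rw [keys_after_inner _ _ e2]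
    intro x hx
    simp only [List.map_append, List.mem_append, List.map_map] at hx
    rcases hx with hx | hx
    · simp [PySem.Dict.empty] at hx
    · simp only [List.mem_map, List.mem_range, Function.comp] at hx
      obtain ⟨j, hj, rfl⟩ := hx
      omega
  obtain ⟨f1, f2⟩ := foldSegsTail rest (0 + 1) (0 + (seg0.length : Int)) (0 + (seg0.length : Int)) _ _
    (by omega) (fun sg hsg => hgf sg (hsplit ▸ List.mem_cons_of_mem seg0 hsg)) h1'' h2''
  have hsegspec := spec_seg seg0 (tailJoin rest) 0 0 (hgf seg0 (hsplit ▸ List.mem_cons_self))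
  rw [hjoin] at hsegspec
  simp only
  rw [a1, a2, f1, f2, e1, e2, hsegspec]
  simp [List.append_assoc]
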